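-- pv_equiv track=rewrite | github.com/twainstain/Medical_Billing | ingestion/ingest/patients.py | _split_hl7_messages
-- ===== SOURCE A (Python) =====
-- def _split_hl7_messages(raw: str) -> list:
--     """Split a multi-message HL7 file into individual messages."""
--     # Normalize line endings
--     raw = raw.replace("\r\n", "\n").replace("\r", "\n")
--     messages = []
--     current = []
--     for line in raw.split("\n"):
--         if line.startswith("MSH") and current:
--             messages.append("\n".join(current))
--             current = []
--         if line.strip():
--             current.append(line)
--     if current:
--         messages.append("\n".join(current))
--     return messages
-- ===== SOURCE B (Python) =====
-- def _split_hl7_messages(raw: str) -> list: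
--     """Split a multi-message HL7 file into individual messages.
--
--     Different decomposition: normalize + filter out blank lines first, then
--     build the groups back-to-front with a single reversed pass that seals a
--     group at every MSH line and keeps a pre-MSH preamble as its own group.
--     """
--     lines = [l for l in raw.replace("\r\n", "\n").replace("\r", "\n").split("\n") if l.strip()]
--     sealed = []
--     open_ = []
--     for line in reversed(lines):
--         if line.startswith("MSH"):
--             sealed = [[line] + open_] + sealed
--             open_ = []
--         else:
--             open_ = [line] + open_
--     if open_:
--         sealed = [open_] + sealed
--     return ["\n".join(g) for g in sealed]
-- ===== Notes on version B (the rewrite author's own statement) =====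
-- stated objective: alternative
-- what changed: A accumulates messages in one forward stateful loop over all lines (flush-on-MSH with a 'current' buffer); B first filters out blank lines, then builds the group list back-to-front with a single reversed pass that seals a group at each MSH line, keeping any pre-MSH preamble as its own group.
import Mathlib
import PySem

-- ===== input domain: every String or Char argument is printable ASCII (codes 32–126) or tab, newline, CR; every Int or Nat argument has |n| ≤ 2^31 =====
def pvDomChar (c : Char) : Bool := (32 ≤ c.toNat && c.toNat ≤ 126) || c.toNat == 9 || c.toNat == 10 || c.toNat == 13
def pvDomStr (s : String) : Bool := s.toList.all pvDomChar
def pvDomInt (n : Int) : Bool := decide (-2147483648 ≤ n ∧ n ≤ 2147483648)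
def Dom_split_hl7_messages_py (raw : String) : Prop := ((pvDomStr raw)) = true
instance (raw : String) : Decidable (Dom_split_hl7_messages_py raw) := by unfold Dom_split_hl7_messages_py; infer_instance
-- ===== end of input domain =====

-- B replaces A's forward flush-on-MSH accumulator loop by: filter out blank lines first, then
-- build the group list back-to-front in one reversed pass (objective: alternative decomposition).

-- ===== PORT A =====
-- shared with B: Python's raw.replace("\r\n","\n").replace("\r","\n") and .split("\n")
def pvNorm (raw : String) : String :=
  PySem.Str.replace (PySem.Str.replace raw "\r\n" "\n") "\r" "\n"

def pvLines (raw : String) : List String :=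
  (PySem.Str.split? (pvNorm raw) "\n").getD []   -- sep "\n" ≠ "", so split? is always some

-- one iteration of A's loop, state = (messages, current)
def pvAStep (st : List String × List String) (line : String) : List String × List String :=
  let st := if PySem.Str.startswith line "MSH" && !st.2.isEmpty
            then (st.1 ++ [PySem.Str.join "\n" st.2], [])
            else st
  if PySem.Str.strip line != "" then (st.1, st.2 ++ [line]) else st

def split_hl7_messages_py (raw : String) : List String :=
  let st := (pvLines raw).foldl pvAStep ([], [])
  if st.2.isEmpty then st.1 else st.1 ++ [PySem.Str.join "\n" st.2]

-- ===== PORT B =====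
-- one iteration of B's reversed loop, state = (sealed, open_)
def pvBStep (st : List (List String) × List String) (line : String) :
    List (List String) × List String :=
  if PySem.Str.startswith line "MSH" then ((line :: st.2) :: st.1, []) else (st.1, line :: st.2)

def split_hl7_messages_py_alt (raw : String) : List String :=
  let lines := (pvLines raw).filter (fun l => PySem.Str.strip l != "")
  let st := lines.reverse.foldl pvBStep ([], [])
  let sealed := if st.2.isEmpty then st.1 else st.2 :: st.1
  sealed.map (fun g => PySem.Str.join "\n" g)

-- ===== PRECONDITION & SPEC =====
def Spec_split_hl7_messages_py (raw : String) (out : List String) : Prop := out = split_hl7_messages_py_alt raw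
instance (raw : String) (out : List String) : Decidable (Spec_split_hl7_messages_py raw out) := by unfold Spec_split_hl7_messages_py; infer_instance

-- ===== CLAIM (what is proved, stated in full; the proofs are below) =====
def Claim_equal_split_hl7_messages_py : Prop := ∀ (raw : String), Dom_split_hl7_messages_py raw → Spec_split_hl7_messages_py raw (split_hl7_messages_py raw)

-- ===== LEMMAS AND PROOFS =====

-- proof-only abbreviations
def pvNb (l : String) : Bool := PySem.Str.strip l != ""
def pvNM (l : String) : Bool := !PySem.Str.startswith l "MSH"
def pvJoin (g : List String) : String := PySem.Str.join "\n" g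

-- specification of the grouping (fuel-based structural recursion; fuel = length suffices):
-- the first chunk is headed by whatever line comes first, later chunks start at MSH lines
def pvChunksF : Nat → List String → List (List String)
  | _, [] => []
  | 0, _ :: _ => []
  | n + 1, l :: rest => (l :: rest.takeWhile pvNM) :: pvChunksF n (rest.dropWhile pvNM)

def pvChunks (ls : List String) : List (List String) := pvChunksF ls.length ls

theorem pvChunksF_congr : ∀ (n m : Nat) (ls : List String),
    ls.length ≤ n → ls.length ≤ m → pvChunksF n ls = pvChunksF m ls := by
  intro n
  induction n with
  | zero =>
    intro m ls hn _
    cases ls with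
    | nil => cases m <;> rfl
    | cons l rest => simp at hn
  | succ n ih =>
    intro m ls hn hm
    cases ls with
    | nil => cases m <;> rfl
    | cons l rest =>
      cases m with
      | zero => simp at hm
      | succ m =>
        simp only [pvChunksF]
        refine congrArg _ (ih m (rest.dropWhile pvNM) ?_ ?_) <;>
          · have := List.length_dropWhile_le pvNM rest
            simp only [List.length_cons] at hn hm
            omega

@[simp] theorem pvChunks_nil : pvChunks [] = [] := rfl

theorem pvChunks_cons (l : String) (rest : List String) :
    pvChunks (l :: rest) = (l :: rest.takeWhile pvNM) :: pvChunks (rest.dropWhile pvNM) := by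
  simp only [pvChunks, List.length_cons, pvChunksF]
  refine congrArg _ (pvChunksF_congr _ _ _ ?_ ?_) <;>
    · have := List.length_dropWhile_le pvNM rest
      omega

-- A's remaining output given a pending current buffer `cur` and remaining blank-free lines `ls`
def pvMJ (cur : List String) (ls : List String) : List String :=
  if cur = [] then (pvChunks ls).map pvJoin
  else pvJoin (cur ++ ls.takeWhile pvNM) :: (pvChunks (ls.dropWhile pvNM)).map pvJoin

-- A's finalization step
def pvFin (st : List String × List String) : List String :=
  if st.2.isEmpty then st.1 else st.1 ++ [pvJoin st.2]

-- a blank line never starts with "MSH"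
theorem pv_blank_not_msh (l : String) (h : PySem.Str.strip l = "") :
    PySem.Chars.startswith l.toList ['M', 'S', 'H'] = false := by
  by_contra hm
  have hm' : PySem.Chars.startswith l.toList ['M', 'S', 'H'] = true := by
    cases hms : PySem.Chars.startswith l.toList ['M', 'S', 'H'] <;> simp_all
  have hpre : ['M', 'S', 'H'] <+: l.toList :=
    (PySem.Chars.startswith_iff l.toList ['M', 'S', 'H']).mp hm'
  obtain ⟨t, ht⟩ := hpre
  have hstrip : PySem.Chars.strip l.toList = [] := by
    have := congrArg String.toList h
    simpa [PySem.Str.toList_strip] using this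
  rw [← ht] at hstrip
  simp only [PySem.Chars.strip, PySem.Chars.lstrip, PySem.Chars.rstrip,
    List.cons_append, List.nil_append] at hstrip
  have hMs : PySem.Chars.isspace 'M' = false := by decide
  rw [List.dropWhile_cons_of_neg (by simp [hMs])] at hstrip
  have h2 : List.dropWhile PySem.Chars.isspace (('M' :: 'S' :: 'H' :: t).reverse) = [] := by
    simpa using hstrip
  rw [List.dropWhile_eq_nil_iff] at h2
  have := h2 'M' (by simp)
  simp [hMs] at this

-- B's reversed loop computes takeWhile/dropWhile/pvChunks of the remaining lines
theorem pv_bloop (ls : List String) :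
    ls.foldr (fun l st => pvBStep st l) ([], []) =
      (pvChunks (ls.dropWhile pvNM), ls.takeWhile pvNM) := by
  induction ls with
  | nil => simp
  | cons l ls ih =>
    rw [List.foldr_cons, ih]
    by_cases hm2 : PySem.Chars.startswith l.toList ['M', 'S', 'H'] = true
    · have hnm : pvNM l = false := by simp [pvNM, hm2]
      simp [pvBStep, hm2, hnm, pvChunks_cons]
    · have hnm : pvNM l = true := by simp [pvNM]; simpa using hm2
      simp [pvBStep, hm2, hnm]

-- B's final reassembly equals pvChunks
theorem pv_bfinal (ls : List String) :
    (if (ls.takeWhile pvNM).isEmpty then pvChunks (ls.dropWhile pvNM)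
     else ls.takeWhile pvNM :: pvChunks (ls.dropWhile pvNM)) = pvChunks ls := by
  cases ls with
  | nil => simp
  | cons l r =>
    by_cases hnm : pvNM l = true
    · simp [List.takeWhile_cons_of_pos hnm, List.dropWhile_cons_of_pos hnm, pvChunks_cons]
    · have hnm' : pvNM l = false := by cases h : pvNM l <;> simp_all
      simp [hnm']

-- A's loop invariant
theorem pv_aloop (ls : List String) : ∀ (msgs cur : List String),
    pvFin (ls.foldl pvAStep (msgs, cur)) = msgs ++ pvMJ cur (ls.filter pvNb) := by
  induction ls with
  | nil =>
    intro msgs cur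
    by_cases hc : cur = [] <;>
      simp [pvFin, pvMJ, hc, List.isEmpty_iff]
  | cons l ls ih =>
    intro msgs cur
    by_cases hb : pvNb l = true
    · -- non-blank line: kept by the filter
      have hs : ¬ PySem.Str.strip l = "" := by simpa [pvNb] using hb
      rw [List.filter_cons_of_pos hb]
      by_cases hm2 : PySem.Chars.startswith l.toList ['M', 'S', 'H'] = true
      · have hnm : pvNM l = false := by simp [pvNM, hm2]
        by_cases hc : cur = []
        · -- MSH line but empty current: no flush, l is appended
          have hstep : pvAStep (msgs, cur) l = (msgs, cur ++ [l]) := by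
            simp [pvAStep, hs, hc]
          rw [List.foldl_cons, hstep, ih]
          simp [pvMJ, hc, pvChunks_cons]
        · -- flush: current becomes a message, l starts the next one
          have hstep : pvAStep (msgs, cur) l = (msgs ++ [pvJoin cur], [l]) := by
            simp [pvAStep, hs, hm2, hc, pvJoin]
          rw [List.foldl_cons, hstep, ih]
          simp [pvMJ, hc, pvChunks_cons, hnm, pvJoin]
      · -- non-MSH non-blank line: just appended
        have hnm : pvNM l = true := by simp [pvNM]; simpa using hm2
        have hstep : pvAStep (msgs, cur) l = (msgs, cur ++ [l]) := by
          simp [pvAStep, hs, hm2]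
        rw [List.foldl_cons, hstep, ih]
        by_cases hc : cur = []
        · simp [pvMJ, hc, pvChunks_cons]
        · simp [pvMJ, hc, List.takeWhile_cons_of_pos hnm, List.dropWhile_cons_of_pos hnm]
    · -- blank line: A's state is unchanged and the filter drops it
      have hb' : pvNb l = false := by cases h : pvNb l <;> simp_all
      have hs : PySem.Str.strip l = "" := by simpa [pvNb] using hb'
      have hm2 := pv_blank_not_msh l hs
      have hstep : pvAStep (msgs, cur) l = (msgs, cur) := by
        simp [pvAStep, hs, hm2]
      rw [List.foldl_cons, hstep, ih, List.filter_cons_of_neg (by simp [hb'])]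

-- the whole equivalence, over an arbitrary line list L
theorem pv_main (L : List String) :
    pvFin (L.foldl pvAStep ([], [])) =
      (let st := (L.filter pvNb).reverse.foldl pvBStep ([], [])
       (if st.2.isEmpty then st.1 else st.2 :: st.1).map pvJoin) := by
  show pvFin (L.foldl pvAStep ([], [])) =
      (if ((L.filter pvNb).reverse.foldl pvBStep ([], [])).2.isEmpty then
          ((L.filter pvNb).reverse.foldl pvBStep ([], [])).1
        else ((L.filter pvNb).reverse.foldl pvBStep ([], [])).2 ::
          ((L.filter pvNb).reverse.foldl pvBStep ([], [])).1).map pvJoin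
  rw [List.foldl_reverse, pv_bloop]
  refine Eq.trans (pv_aloop L [] []) ?_
  rw [show ((pvChunks (List.dropWhile pvNM (List.filter pvNb L)),
        List.takeWhile pvNM (List.filter pvNb L)) :
        List (List String) × List String).2 =
      List.takeWhile pvNM (List.filter pvNb L) from rfl,
    show ((pvChunks (List.dropWhile pvNM (List.filter pvNb L)),
        List.takeWhile pvNM (List.filter pvNb L)) :
        List (List String) × List String).1 =
      pvChunks (List.dropWhile pvNM (List.filter pvNb L)) from rfl]
  rw [pv_bfinal (List.filter pvNb L)]
  simp [pvMJ]

-- ===== VERDICT (by name: the statement is the Claim_ definition above) =====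
theorem split_hl7_messages_py_spec : Claim_equal_split_hl7_messages_py := by
  intro raw _
  show split_hl7_messages_py raw = split_hl7_messages_py_alt raw
  simp only [split_hl7_messages_py, split_hl7_messages_py_alt]
  rw [show (fun l => PySem.Str.strip l != "") = pvNb from rfl]
  generalize pvLines raw = L
  exact pv_main L
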